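-- pv_equiv track=rewrite | github.com/talni/Detection-of-Groups-with-Biased-Representation-in-Ranking | Coding/Algorithms/IterTD_PropBounds.py | findParentForStr
-- ===== SOURCE A (Python) =====
-- def findParentForStr(child):
--     end = 0
--     length = len(child)
--     i = length - 1
--     while i > -1:
--         if child[i] != '|':
--             end = i + 1
--             i -= 1
--             break
--         i -= 1
--     while i > -1:
--         if child[i] == '|':
--             start = i
--             parent = child[:start + 1] + child[end:]
--             return parent
--         i -= 1
--     parent = child[end:]
--     return parent
-- ===== SOURCE B (Python) =====
-- def findParentForStr(child):
--     parts = child.split('|')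
--     for i in range(len(parts) - 1, -1, -1):
--         if parts[i]:
--             parts[i] = ''
--             break
--     return '|'.join(parts)
-- ===== Notes on version B (the rewrite author's own statement) =====
-- stated objective: idiomatic
-- what changed: Replaces A's two manual backward character-index while loops and slice surgery with a segment-list representation: split the string on the delimiter, blank the last non-empty segment in the list, and rejoin, which reconstructs every delimiter faithfully.
import Mathlib
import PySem

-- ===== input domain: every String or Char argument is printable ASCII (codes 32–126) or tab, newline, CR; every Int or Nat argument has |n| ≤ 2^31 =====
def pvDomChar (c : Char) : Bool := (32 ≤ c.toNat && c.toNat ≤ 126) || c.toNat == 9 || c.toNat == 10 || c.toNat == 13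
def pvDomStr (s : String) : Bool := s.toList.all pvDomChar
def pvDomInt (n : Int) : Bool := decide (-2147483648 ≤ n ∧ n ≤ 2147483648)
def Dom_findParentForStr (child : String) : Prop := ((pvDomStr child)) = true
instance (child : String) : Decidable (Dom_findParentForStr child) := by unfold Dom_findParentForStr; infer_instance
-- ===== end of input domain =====

-- B replaces A's two backward character-index while loops and slice surgery by a segment-list
-- view: split on '|', blank the last non-empty segment, rejoin with '|'. Both are total.

-- ===== PORT A =====
-- first while loop: i runs length-1 .. 0, encoded by n = i + 1 (so n = 0 is i = -1).
-- child[i] is ported as cs.getD m ' ': exact, since the loop only reads indices 0 ≤ m < cs.length.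
-- on break it returns (end, i + 1) for the i the second loop starts at; exhausted, (end, 0).
def pvA_loop1 (cs : List Char) (endv : Nat) : Nat → Nat × Nat
  | 0 => (endv, 0)
  | Nat.succ m => if cs.getD m ' ' ≠ '|' then (m + 1, m) else pvA_loop1 cs endv m

-- second while loop: scan i = n-1 .. 0 for child[i] == '|'; returns `start` on the first hit.
def pvA_loop2 (cs : List Char) : Nat → Option Nat
  | 0 => none
  | Nat.succ m => if cs.getD m ' ' = '|' then some m else pvA_loop2 cs m

-- A's body on the character list; child[:start + 1] / child[end:] are take/drop — exact here
-- since both indices are nonnegative.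
def pvAbody (cs : List Char) : List Char :=
  let p := pvA_loop1 cs 0 cs.length
  match pvA_loop2 cs p.2 with
  | some start => cs.take (start + 1) ++ cs.drop p.1
  | none => cs.drop p.1

def findParentForStr (child : String) : String :=
  String.ofList (pvAbody child.toList)

-- ===== PORT B =====
-- the backward `for` loop with break, as structural recursion from the right end of the list:
-- returns (new parts, whether a non-empty segment was already blanked).
def pvB_go : List (List Char) → List (List Char) × Bool
  | [] => ([], false)
  | p :: rest =>
    let r := pvB_go rest
    if r.2 then (p :: r.1, true)
    else if p ≠ [] then ([] :: r.1, true)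
    else (p :: r.1, false)

-- child.split('|') is PySem.Chars.splitOn (the non-empty-separator split); '|'.join is PySem.Chars.join.
def pvBbody (cs : List Char) : List Char :=
  let parts := PySem.Chars.splitOn cs ['|']
  PySem.Chars.join ['|'] (pvB_go parts).1

def findParentForStr_alt (child : String) : String :=
  String.ofList (pvBbody child.toList)

-- ===== PRECONDITION & SPEC =====
def Spec_findParentForStr (child : String) (out : String) : Prop := out = findParentForStr_alt child
instance (child : String) (out : String) : Decidable (Spec_findParentForStr child out) := by unfold Spec_findParentForStr; infer_instance

-- ===== CLAIM (what is proved, stated in full; the proofs are below) =====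
def Claim_equal_findParentForStr : Prop := ∀ (child : String), Dom_findParentForStr child → Spec_findParentForStr child (findParentForStr child)

-- ===== LEMMAS AND PROOFS =====

-- proof-side model of splitOn cs ['|']: simple left recursion on the characters
def pvSplit (c : Char) : List Char → List (List Char)
  | [] => [[]]
  | a :: rest =>
    if a = c then [] :: pvSplit c rest
    else match pvSplit c rest with
      | [] => [[a]]
      | p :: ps => (a :: p) :: ps

def pvMapHead (f : List Char → List Char) : List (List Char) → List (List Char)
  | [] => []
  | p :: ps => f p :: ps

def pvMapLast (f : List Char → List Char) : List (List Char) → List (List Char)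
  | [] => []
  | [p] => [f p]
  | p :: q :: ps => p :: pvMapLast f (q :: ps)

theorem pvSplit_ne_nil (c : Char) (cs : List Char) : pvSplit c cs ≠ [] := by
  induction cs with
  | nil => simp [pvSplit]
  | cons a rest ih =>
    simp only [pvSplit]
    split_ifs
    · simp
    · cases h : pvSplit c rest <;> simp

theorem go_eq (c : Char) : ∀ (fuel : Nat) (l cur : List Char) (acc : List (List Char)),
    l.length < fuel →
    PySem.Chars.splitOn.go [c] fuel l cur acc
      = acc.reverse ++ pvMapHead (cur.reverse ++ ·) (pvSplit c l) := by
  intro fuel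
  induction fuel with
  | zero => intro l cur acc h; omega
  | succ m ih =>
    intro l cur acc h
    cases l with
    | nil => simp [PySem.Chars.splitOn.go, pvSplit, pvMapHead]
    | cons a rest =>
      by_cases hc : a = c
      · subst hc
        have hpre : List.isPrefixOf [a] (a :: rest) = true := by
          simp [List.isPrefixOf]
        rw [PySem.Chars.splitOn.go]
        simp only [hpre, if_true]
        have : List.drop [a].length (a :: rest) = rest := by simp
        rw [this, ih rest [] (cur.reverse :: acc) (by simp at h ⊢; omega)]
        simp only [pvSplit, pvMapHead, List.reverse_cons, List.reverse_nil,
          List.nil_append, List.append_assoc, List.cons_append]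
        cases hs : pvSplit a rest with
        | nil => exact absurd hs (pvSplit_ne_nil a rest)
        | cons p ps => simp
      · have hpre : List.isPrefixOf [c] (a :: rest) = false := by
          simp [List.isPrefixOf]; exact fun hh => absurd hh.symm hc
        rw [PySem.Chars.splitOn.go]
        simp only [hpre]
        rw [if_neg (by simp)]
        rw [ih rest (a :: cur) acc (by simp at h ⊢; omega)]
        simp only [pvSplit, if_neg hc]
        cases hs : pvSplit c rest with
        | nil => exact absurd hs (pvSplit_ne_nil c rest)
        | cons p ps => simp [pvMapHead]

theorem splitOn_eq_pvSplit (c : Char) (cs : List Char) :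
    PySem.Chars.splitOn cs [c] = pvSplit c cs := by
  rw [PySem.Chars.splitOn, go_eq c (cs.length + 1) cs [] [] (by omega)]
  cases h : pvSplit c cs with
  | nil => exact absurd h (pvSplit_ne_nil c cs)
  | cons p ps => simp [pvMapHead]

-- join of ps ++ [q]
theorem join_concat (sep q : List Char) (ps : List (List Char)) (h : ps ≠ []) :
    PySem.Chars.join sep (ps ++ [q]) = PySem.Chars.join sep ps ++ sep ++ q := by
  induction ps with
  | nil => exact absurd rfl h
  | cons p rest ih =>
    cases rest with
    | nil => rw [List.cons_append, List.nil_append, PySem.Chars.join_cons_cons,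
        PySem.Chars.join_singleton, PySem.Chars.join_singleton]
    | cons r rs =>
      rw [List.cons_append, List.cons_append, PySem.Chars.join_cons_cons,
        ← List.cons_append, ih (by simp), PySem.Chars.join_cons_cons]
      simp [List.append_assoc]

theorem join_pvSplit (c : Char) (cs : List Char) :
    PySem.Chars.join [c] (pvSplit c cs) = cs := by
  induction cs with
  | nil => simp [pvSplit, PySem.Chars.join_singleton]
  | cons a rest ih =>
    simp only [pvSplit]
    split_ifs with hc
    · subst hc
      cases hs : pvSplit a rest with
      | nil => exact absurd hs (pvSplit_ne_nil a rest)
      | cons p ps =>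
        rw [PySem.Chars.join_cons_cons, ← hs, ih]; rfl
    · cases hs : pvSplit c rest with
      | nil => exact absurd hs (pvSplit_ne_nil c rest)
      | cons p ps =>
        cases ps with
        | nil =>
          rw [PySem.Chars.join_singleton]
          have := ih; rw [hs, PySem.Chars.join_singleton] at this
          simp [this]
        | cons q qs =>
          rw [PySem.Chars.join_cons_cons]
          have := ih; rw [hs, PySem.Chars.join_cons_cons] at this
          simp only [List.cons_append, ← this]

theorem pvSplit_concat_sep (c : Char) (cs : List Char) :
    pvSplit c (cs ++ [c]) = pvSplit c cs ++ [[]] := by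
  induction cs with
  | nil => simp [pvSplit]
  | cons a rest ih =>
    simp only [List.cons_append, pvSplit, ih]
    split_ifs with hc
    · rfl
    · cases hs : pvSplit c rest with
      | nil => exact absurd hs (pvSplit_ne_nil c rest)
      | cons p ps => simp

theorem pvSplit_concat_ne (c a : Char) (ha : a ≠ c) (cs : List Char) :
    pvSplit c (cs ++ [a]) = pvMapLast (· ++ [a]) (pvSplit c cs) := by
  induction cs with
  | nil => simp [pvSplit, ha, pvMapLast]
  | cons b rest ih =>
    simp only [List.cons_append, pvSplit, ih]
    split_ifs with hb
    · cases hs : pvSplit c rest with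
      | nil => exact absurd hs (pvSplit_ne_nil c rest)
      | cons p ps => simp [pvMapLast]
    · cases hs : pvSplit c rest with
      | nil => exact absurd hs (pvSplit_ne_nil c rest)
      | cons p ps =>
        cases ps with
        | nil => simp [pvMapLast]
        | cons q qs => simp [pvMapLast]

theorem pvB_go_length (ps : List (List Char)) : (pvB_go ps).1.length = ps.length := by
  induction ps with
  | nil => simp [pvB_go]
  | cons p rest ih =>
    simp only [pvB_go]
    split_ifs <;> simp [ih]

theorem pvB_go_concat_nil (ps : List (List Char)) :
    pvB_go (ps ++ [[]]) = ((pvB_go ps).1 ++ [[]], (pvB_go ps).2) := by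
  induction ps with
  | nil => simp [pvB_go]
  | cons p rest ih =>
    simp only [List.cons_append, pvB_go, ih]
    split_ifs <;> simp

theorem pvB_go_concat_ne (q : List Char) (hq : q ≠ []) (ps : List (List Char)) :
    pvB_go (ps ++ [q]) = (ps ++ [[]], true) := by
  induction ps with
  | nil => simp [pvB_go, hq]
  | cons p rest ih =>
    simp only [List.cons_append, pvB_go, ih]
    simp

theorem pvMapLast_concat (f : List Char → List Char) (ps : List (List Char)) (q : List Char) :
    pvMapLast f (ps ++ [q]) = ps ++ [f q] := by
  induction ps with
  | nil => rfl
  | cons p rest ih =>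
    cases rest with
    | nil => rfl
    | cons r rs => simpa [pvMapLast] using ih

theorem dropLast_pvMapLast (f : List Char → List Char) (ps : List (List Char)) :
    (pvMapLast f ps).dropLast = ps.dropLast := by
  rcases List.eq_nil_or_concat ps with h | ⟨qs, q, h⟩
  · simp [h, pvMapLast]
  · subst h; rw [List.concat_eq_append, pvMapLast_concat]; simp

theorem pvA_loop1_prefix (cs t : List Char) (e : Nat) :
    ∀ n, n ≤ cs.length → pvA_loop1 (cs ++ t) e n = pvA_loop1 cs e n := by
  intro n
  induction n with
  | zero => intro _; rfl
  | succ m ih =>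
    intro h
    have hg : (cs ++ t).getD m ' ' = cs.getD m ' ' := List.getD_append cs t ' ' m (by omega)
    simp only [pvA_loop1, hg]
    split_ifs
    · rfl
    · exact ih (by omega)

theorem pvA_loop2_prefix (cs t : List Char) :
    ∀ n, n ≤ cs.length → pvA_loop2 (cs ++ t) n = pvA_loop2 cs n := by
  intro n
  induction n with
  | zero => intro _; rfl
  | succ m ih =>
    intro h
    have hg : (cs ++ t).getD m ' ' = cs.getD m ' ' := List.getD_append cs t ' ' m (by omega)
    simp only [pvA_loop2, hg]
    split_ifs
    · rfl
    · exact ih (by omega)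

theorem pvA_loop1_bounds (cs : List Char) :
    ∀ n, (pvA_loop1 cs 0 n).1 ≤ n ∧ (pvA_loop1 cs 0 n).2 ≤ n := by
  intro n
  induction n with
  | zero => simp [pvA_loop1]
  | succ m ih =>
    simp only [pvA_loop1]
    split_ifs
    · simp
    · omega

theorem pvA_loop2_lt (cs : List Char) :
    ∀ n j, pvA_loop2 cs n = some j → j < n := by
  intro n
  induction n with
  | zero => intro j h; simp [pvA_loop2] at h
  | succ m ih =>
    intro j h
    simp only [pvA_loop2] at h
    split_ifs at h
    · cases h; omega
    · have := ih j h; omega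

-- A on cs ++ ['|'] appends '|'
theorem pvAbody_concat_sep (cs : List Char) :
    pvAbody (cs ++ ['|']) = pvAbody cs ++ ['|'] := by
  have hlen : (cs ++ ['|']).length = cs.length + 1 := by simp
  have hget : (cs ++ ['|']).getD cs.length ' ' = '|' := by
    simp [List.getD_eq_getElem?_getD]
  have h1 : pvA_loop1 (cs ++ ['|']) 0 (cs.length + 1) = pvA_loop1 cs 0 cs.length := by
    simp only [pvA_loop1, hget]
    rw [if_neg (by simp)]
    exact pvA_loop1_prefix cs ['|'] 0 cs.length le_rfl
  obtain ⟨hb1, hb2⟩ := pvA_loop1_bounds cs cs.length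
  have h2 : pvA_loop2 (cs ++ ['|']) (pvA_loop1 cs 0 cs.length).2
      = pvA_loop2 cs (pvA_loop1 cs 0 cs.length).2 :=
    pvA_loop2_prefix cs ['|'] _ hb2
  have hdrop : (cs ++ ['|']).drop (pvA_loop1 cs 0 cs.length).1
      = cs.drop (pvA_loop1 cs 0 cs.length).1 ++ ['|'] := by
    rw [List.drop_append]
    have : (pvA_loop1 cs 0 cs.length).1 - cs.length = 0 := by omega
    rw [this]; rfl
  simp only [pvAbody, hlen, h1, h2]
  cases hj : pvA_loop2 cs (pvA_loop1 cs 0 cs.length).2 with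
  | none => simpa using hdrop
  | some j =>
    have hjlt : j < cs.length := lt_of_lt_of_le (pvA_loop2_lt cs _ j hj) hb2
    have htake : (cs ++ ['|']).take (j + 1) = cs.take (j + 1) := by
      rw [List.take_append]
      have : j + 1 - cs.length = 0 := by omega
      simp [this]
    simp [htake, hdrop]

-- the second loop at full length computes rdropWhile (· != '|')
theorem pvA_loop2_rdrop (cs : List Char) :
    (match pvA_loop2 cs cs.length with
     | some j => cs.take (j + 1)
     | none => []) = cs.rdropWhile (· != '|') := by
  induction cs using List.reverseRecOn with
  | nil => simp [pvA_loop2]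
  | append_singleton cs x ih =>
    have hget : (cs ++ [x]).getD cs.length ' ' = x := by
      simp [List.getD_eq_getElem?_getD]
    have hlen : (cs ++ [x]).length = cs.length + 1 := by simp
    rw [hlen]
    by_cases hx : x = '|'
    · subst hx
      simp only [pvA_loop2, hget, if_true]
      rw [List.rdropWhile_concat_neg _ _ _ (by simp)]
      simp
    · simp only [pvA_loop2, hget]
      rw [if_neg hx, pvA_loop2_prefix cs [x] cs.length le_rfl,
        List.rdropWhile_concat_pos _ _ _ (by simp [hx]), ← ih]
      cases hj : pvA_loop2 cs cs.length with
      | none => rfl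
      | some j =>
        have hjlt : j < cs.length := pvA_loop2_lt cs _ j hj
        have : (cs ++ [x]).take (j + 1) = cs.take (j + 1) := by
          rw [List.take_append]
          have : j + 1 - cs.length = 0 := by omega
          simp [this]
        simp [this]

-- A on cs ++ [a] (a ≠ '|') trims to the last '|' of cs
theorem pvAbody_concat_ne (a : Char) (ha : a ≠ '|') (cs : List Char) :
    pvAbody (cs ++ [a]) = cs.rdropWhile (· != '|') := by
  have hget : (cs ++ [a]).getD cs.length ' ' = a := by
    simp [List.getD_eq_getElem?_getD]
  have hlen : (cs ++ [a]).length = cs.length + 1 := by simp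
  have h1 : pvA_loop1 (cs ++ [a]) 0 (cs.length + 1) = (cs.length + 1, cs.length) := by
    simp only [pvA_loop1, hget]
    rw [if_pos ha]
  have hdrop : (cs ++ [a]).drop (cs.length + 1) = [] := by
    apply List.drop_eq_nil_of_le; simp
  simp only [pvAbody, hlen, h1]
  rw [pvA_loop2_prefix cs [a] cs.length le_rfl, ← pvA_loop2_rdrop cs]
  cases hj : pvA_loop2 cs cs.length with
  | none => simp [hdrop]
  | some j =>
    have hjlt : j < cs.length := pvA_loop2_lt cs _ j hj
    have htake : (cs ++ [a]).take (j + 1) = cs.take (j + 1) := by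
      rw [List.take_append]
      have : j + 1 - cs.length = 0 := by omega
      simp [this]
    simp [htake, hdrop]

-- B on cs ++ ['|'] appends '|'
theorem pvBbody_concat_sep (cs : List Char) :
    pvBbody (cs ++ ['|']) = pvBbody cs ++ ['|'] := by
  simp only [pvBbody, splitOn_eq_pvSplit, pvSplit_concat_sep, pvB_go_concat_nil]
  have hne : (pvB_go (pvSplit '|' cs)).1 ≠ [] := by
    intro h
    have := pvB_go_length (pvSplit '|' cs)
    rw [h] at this
    exact pvSplit_ne_nil '|' cs (List.length_eq_zero_iff.mp this.symm)
  rw [join_concat _ _ _ hne]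
  simp

-- join of (pvSplit cs).dropLast ++ [[]] is rdropWhile (· != '|')
theorem join_dropLast_pvSplit (cs : List Char) :
    PySem.Chars.join ['|'] ((pvSplit '|' cs).dropLast ++ [[]])
      = cs.rdropWhile (· != '|') := by
  induction cs using List.reverseRecOn with
  | nil => simp [pvSplit, PySem.Chars.join_singleton]
  | append_singleton cs x ih =>
    by_cases hx : x = '|'
    · subst hx
      rw [pvSplit_concat_sep, List.rdropWhile_concat_neg _ _ _ (by simp)]
      simp only [List.dropLast_concat]
      rw [join_concat _ _ _ (pvSplit_ne_nil '|' cs), join_pvSplit]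
      simp
    · rw [pvSplit_concat_ne '|' x hx, dropLast_pvMapLast,
        List.rdropWhile_concat_pos _ _ _ (by simp [hx]), ih]

-- B on cs ++ [a] (a ≠ '|') trims to the last '|' of cs
theorem pvBbody_concat_ne (a : Char) (ha : a ≠ '|') (cs : List Char) :
    pvBbody (cs ++ [a]) = cs.rdropWhile (· != '|') := by
  simp only [pvBbody, splitOn_eq_pvSplit, pvSplit_concat_ne '|' a ha]
  rcases List.eq_nil_or_concat (pvSplit '|' cs) with h | ⟨qs, q, h⟩
  · exact absurd h (pvSplit_ne_nil '|' cs)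
  · rw [List.concat_eq_append] at h
    rw [h, pvMapLast_concat, pvB_go_concat_ne (q ++ [a]) (by simp) qs]
    have : (pvSplit '|' cs).dropLast = qs := by rw [h]; simp
    rw [← this, ← join_dropLast_pvSplit cs]

theorem pvAB (cs : List Char) : pvAbody cs = pvBbody cs := by
  induction cs using List.reverseRecOn with
  | nil => decide
  | append_singleton cs x ih =>
    by_cases hx : x = '|'
    · subst hx
      rw [pvAbody_concat_sep, pvBbody_concat_sep, ih]
    · rw [pvAbody_concat_ne x hx, pvBbody_concat_ne x hx]

-- ===== VERDICT (by name: the statement is the Claim_ definition above) =====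
theorem findParentForStr_spec : Claim_equal_findParentForStr := by
  intro child _
  unfold Spec_findParentForStr findParentForStr findParentForStr_alt
  exact congrArg String.ofList (pvAB child.toList)
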